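-- pv_equiv track=rewrite | github.com/karthikb191/Project-Quaint | Tools/BuildTool/main.py | IdentifyParamTypeAndCleanup
-- ===== SOURCE A (Python) =====
-- def IdentifyParamTypeAndCleanup(Param : str) -> tuple[str, str] | None:
--     if (Param is None) or (len(Param) == 0):
--         return (None, "")
--
--     EvaluatingString = False
--     CleanedParam = ""
--     for c in Param:
--         if c is "\"" or c is "\'":
--             EvaluatingString = not EvaluatingString
--
--         if c is " " and not EvaluatingString:
--             continue
--
--         CleanedParam += c
--
--     Type = ""
--     if len(CleanedParam) == 0 :
--         return (None, CleanedParam)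
--     c = CleanedParam[0]
--     if c is '{' :
--         Type = "Dictionary"
--         #CleanedParam = CleanedParam[1:len(CleanedParam)-1]
--     elif c is '[' or c is '(':
--         Type = "List"
--         #CleanedParam = CleanedParam[1:len(CleanedParam)-1]
--     elif ord(c) >= 48 and ord(c) <= 57:
--         Type = "Number"
--     else:
--         Type = "String"
--
--     return (Type, CleanedParam)
-- ===== SOURCE B (Python) =====
-- def IdentifyParamTypeAndCleanup(Param):
--     if Param is None or len(Param) == 0:
--         return (None, "")
--     # Pass 1: split Param on quote characters into text segments, remembering the quotes.
--     segments = []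
--     quotes = []
--     cur = ""
--     for ch in Param:
--         if ch == '"' or ch == "'":
--             segments.append(cur)
--             quotes.append(ch)
--             cur = ""
--         else:
--             cur += ch
--     segments.append(cur)
--     # Pass 2: rebuild; segment k sits after k quotes, so odd k is inside quotes.
--     pieces = []
--     for k in range(len(segments)):
--         pieces.append(segments[k] if k % 2 == 1 else segments[k].replace(" ", ""))
--         if k < len(quotes):
--             pieces.append(quotes[k])
--     cleaned = "".join(pieces)
--     if len(cleaned) == 0:
--         return (None, "")
--     c = cleaned[0]
--     if c == '{':
--         t = "Dictionary"
--     elif c == '[' or c == '(':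
--         t = "List"
--     elif '0' <= c <= '9':
--         t = "Number"
--     else:
--         t = "String"
--     return (t, cleaned)
-- ===== Notes on version B (the rewrite author's own statement) =====
-- stated objective: alternative
-- what changed: Replaces A's single-pass boolean state machine by a two-pass decomposition: first split the string on quote characters into segments, then rebuild it, stripping spaces only from even-indexed (outside-quotes) segments, before classifying the first character.
import Mathlib
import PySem

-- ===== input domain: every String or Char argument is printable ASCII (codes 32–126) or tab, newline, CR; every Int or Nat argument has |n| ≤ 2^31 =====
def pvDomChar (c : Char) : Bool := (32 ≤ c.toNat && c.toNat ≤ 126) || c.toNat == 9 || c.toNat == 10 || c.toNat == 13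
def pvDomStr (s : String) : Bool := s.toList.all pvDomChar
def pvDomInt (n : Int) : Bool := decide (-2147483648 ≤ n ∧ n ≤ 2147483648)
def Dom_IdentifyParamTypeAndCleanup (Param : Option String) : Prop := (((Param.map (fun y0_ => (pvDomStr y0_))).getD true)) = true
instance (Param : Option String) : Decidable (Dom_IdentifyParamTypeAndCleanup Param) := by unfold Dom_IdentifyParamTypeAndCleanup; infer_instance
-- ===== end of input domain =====

-- B rebuilds the cleaned string from quote-split segments (two passes) instead of A's one-pass boolean state machine; same cost, different decomposition.


-- ===== PORT A =====
-- A's loop body: toggle EvaluatingString on a quote, skip spaces outside quotes, append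
def pvStepA (st : Bool × List Char) (c : Char) : Bool × List Char :=
  let ev := if c = '"' ∨ c = '\'' then !st.1 else st.1
  if c = ' ' ∧ ev = false then (ev, st.2) else (ev, st.2 ++ [c])

def IdentifyParamTypeAndCleanup (Param : Option String) : Option (Option String × String) :=
  match Param with
  | none => some (none, "")
  | some s =>
    if s.toList.length = 0 then some (none, "")
    else
      let st := s.toList.foldl pvStepA (false, [])
      let cleaned := st.2
      if cleaned.length = 0 then some (none, String.mk cleaned)
      else
        let c := cleaned.headI
        let ty := if c = '{' then "Dictionary"
          else if c = '[' ∨ c = '(' then "List"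
          else if 48 ≤ c.toNat ∧ c.toNat ≤ 57 then "Number"
          else "String"
        some (some ty, String.mk cleaned)

-- ===== PORT B =====
-- Source B pass 1: one loop step — on a quote, close the current segment; otherwise extend it
def pvSplitStep (st : List (List Char) × List Char × List Char) (c : Char) :
    List (List Char) × List Char × List Char :=
  if c = '"' ∨ c = '\'' then (st.1 ++ [st.2.2], st.2.1 ++ [c], [])
  else (st.1, st.2.1, st.2.2 ++ [c])

-- Source B pass 2: interleave segments (space-stripped at even index) with the quote characters
def pvRebuild : Nat → List (List Char) → List Char → List Char
  | _, [], _ => []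
  | k, seg :: segs, qs =>
    let seg' := if k % 2 = 1 then seg else seg.filter (fun c => c ≠ ' ')
    match qs with
    | [] => seg'
    | q :: qs' => seg' ++ q :: pvRebuild (k + 1) segs qs'

def IdentifyParamTypeAndCleanup_alt (Param : Option String) : Option (Option String × String) :=
  match Param with
  | none => some (none, "")
  | some s =>
    if s.toList.length = 0 then some (none, "")
    else
      let st := s.toList.foldl pvSplitStep ([], [], [])
      let segments := st.1 ++ [st.2.2]
      let quotes := st.2.1
      let cleaned := pvRebuild 0 segments quotes
      if cleaned.length = 0 then some (none, "")
      else
        let c := cleaned.headI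
        let ty := if c = '{' then "Dictionary"
          else if c = '[' ∨ c = '(' then "List"
          else if '0' ≤ c ∧ c ≤ '9' then "Number"
          else "String"
        some (some ty, String.mk cleaned)

-- ===== PRECONDITION & SPEC =====
def Spec_IdentifyParamTypeAndCleanup (Param : Option String) (out : Option (Option String × String)) : Prop := out = IdentifyParamTypeAndCleanup_alt Param
instance (Param : Option String) (out : Option (Option String × String)) : Decidable (Spec_IdentifyParamTypeAndCleanup Param out) := by unfold Spec_IdentifyParamTypeAndCleanup; infer_instance

-- ===== CLAIM (what is proved, stated in full; the proofs are below) =====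
def Claim_equal_IdentifyParamTypeAndCleanup : Prop := ∀ (Param : Option String), Dom_IdentifyParamTypeAndCleanup Param → Spec_IdentifyParamTypeAndCleanup Param (IdentifyParamTypeAndCleanup Param)

-- ===== LEMMAS AND PROOFS =====

-- reference cleaning function both ports are reduced to
def cleanRec : Bool → List Char → List Char
  | _, [] => []
  | ev, c :: cs =>
    let ev' := if c = '"' ∨ c = '\'' then !ev else ev
    if c = ' ' ∧ ev' = false then cleanRec ev' cs else c :: cleanRec ev' cs

theorem foldlA_eq_cleanRec (l : List Char) : ∀ (ev : Bool) (acc : List Char),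
    (l.foldl pvStepA (ev, acc)).2 = acc ++ cleanRec ev l := by
  induction l with
  | nil => intro ev acc; simp [cleanRec]
  | cons c cs ih =>
    intro ev acc
    rw [List.foldl_cons]
    by_cases hq : c = '"' ∨ c = '\''
    · have hc : ¬ (c = ' ') := by rcases hq with h | h <;> simp [h]
      have hstep : pvStepA (ev, acc) c = (!ev, acc ++ [c]) := by
        simp [pvStepA, hq, hc]
      rw [hstep, ih]
      simp [cleanRec, hq, hc]
    · by_cases hs : c = ' ' ∧ ev = false
      · have hstep : pvStepA (ev, acc) c = (ev, acc) := by
          simp [pvStepA, hq, hs.1, hs.2]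
        rw [hstep, ih]
        simp [cleanRec, hq, hs.1, hs.2]
      · have hstep : pvStepA (ev, acc) c = (ev, acc ++ [c]) := by
          simp only [pvStepA, hq, if_false]
          simp [hs]
        rw [hstep, ih]
        simp only [cleanRec, hq, if_false]
        simp [hs]

-- right-recursive splitter, target of the fold
def splitR : List Char → List (List Char) × List Char
  | [] => ([[]], [])
  | c :: cs =>
    let r := splitR cs
    if c = '"' ∨ c = '\'' then ([] :: r.1, c :: r.2)
    else ((c :: r.1.headI) :: r.1.tail, r.2)

theorem splitR_fst_ne_nil (l : List Char) : (splitR l).1 ≠ [] := by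
  cases l with
  | nil => simp [splitR]
  | cons c cs =>
    simp only [splitR]
    by_cases hq : c = '"' ∨ c = '\'' <;> simp [hq]

theorem foldl_splitStep (l : List Char) : ∀ (segs : List (List Char)) (qs cur : List Char),
    (l.foldl pvSplitStep (segs, qs, cur)).1 ++ [(l.foldl pvSplitStep (segs, qs, cur)).2.2]
      = segs ++ (cur ++ (splitR l).1.headI) :: (splitR l).1.tail
    ∧ (l.foldl pvSplitStep (segs, qs, cur)).2.1 = qs ++ (splitR l).2 := by
  induction l with
  | nil => intro segs qs cur; simp [splitR]
  | cons c cs ih =>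
    intro segs qs cur
    rw [List.foldl_cons]
    obtain ⟨s, ss, hss⟩ := List.exists_cons_of_ne_nil (splitR_fst_ne_nil cs)
    by_cases hq : c = '"' ∨ c = '\''
    · have hstep : pvSplitStep (segs, qs, cur) c = (segs ++ [cur], qs ++ [c], []) := by
        simp [pvSplitStep, hq]
      rw [hstep]
      obtain ⟨h1, h2⟩ := ih (segs ++ [cur]) (qs ++ [c]) []
      constructor
      · rw [h1]; simp only [splitR, hq, if_true, hss]
        simp
      · rw [h2]; simp [splitR, hq]
    · have hstep : pvSplitStep (segs, qs, cur) c = (segs, qs, cur ++ [c]) := by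
        simp [pvSplitStep, hq]
      rw [hstep]
      obtain ⟨h1, h2⟩ := ih segs qs (cur ++ [c])
      constructor
      · rw [h1]; simp [splitR, hq, hss]
      · rw [h2]; simp [splitR, hq]

-- peeling one non-quote character off the head segment of a rebuild
theorem pvRebuild_cons_head (k : Nat) (c : Char) (h : List Char) (t : List (List Char))
    (qs : List Char) :
    pvRebuild k ((c :: h) :: t) qs
      = (if k % 2 = 1 then [c] else if c = ' ' then [] else [c]) ++ pvRebuild k (h :: t) qs := by
  cases qs with
  | nil =>
    by_cases hk : k % 2 = 1
    · simp [pvRebuild, hk]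
    · by_cases hc : c = ' ' <;> simp [pvRebuild, hk, hc, List.filter]
  | cons q qs' =>
    by_cases hk : k % 2 = 1
    · simp [pvRebuild, hk]
    · by_cases hc : c = ' ' <;> simp [pvRebuild, hk, hc, List.filter]

theorem rebuild_splitR (l : List Char) : ∀ (k : Nat),
    pvRebuild k (splitR l).1 (splitR l).2 = cleanRec (decide (k % 2 = 1)) l := by
  induction l with
  | nil => intro k; simp [splitR, pvRebuild, cleanRec]
  | cons c cs ih =>
    intro k
    by_cases hq : c = '"' ∨ c = '\''
    · have hc : ¬ (c = ' ') := by rcases hq with h | h <;> simp [h]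
      have hpar : decide ((k + 1) % 2 = 1) = !decide (k % 2 = 1) := by
        rcases Nat.even_or_odd k with he | ho
        · have hk : k % 2 = 0 := Nat.even_iff.mp he
          simp [Nat.add_mod, hk]
        · have hk : k % 2 = 1 := Nat.odd_iff.mp ho
          simp [Nat.add_mod, hk]
      simp only [splitR, cleanRec, hq, if_true]
      rw [show pvRebuild k ([] :: (splitR cs).1) (c :: (splitR cs).2)
            = c :: pvRebuild (k + 1) (splitR cs).1 (splitR cs).2 by
          by_cases hk : k % 2 = 1 <;> simp [pvRebuild, hk]]
      rw [ih (k + 1), hpar]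
      simp [hc]
    · obtain ⟨s, ss, hss⟩ := List.exists_cons_of_ne_nil (splitR_fst_ne_nil cs)
      have hbase : pvRebuild k (s :: ss) (splitR cs).2 = cleanRec (decide (k % 2 = 1)) cs := by
        rw [← hss]; exact ih k
      simp only [splitR, cleanRec, hq, if_false, hss, List.headI, List.tail_cons]
      rw [pvRebuild_cons_head, hbase]
      by_cases hk : k % 2 = 1
      · simp [hk]
      · by_cases hc : c = ' ' <;> simp [hk, hc]

-- both cleaned strings coincide
theorem cleaned_eq (l : List Char) :
    (l.foldl pvStepA (false, [])).2
    = pvRebuild 0 ((l.foldl pvSplitStep ([], [], [])).1 ++ [(l.foldl pvSplitStep ([], [], [])).2.2])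
        (l.foldl pvSplitStep ([], [], [])).2.1 := by
  obtain ⟨h1, h2⟩ := foldl_splitStep l [] [] []
  rw [h1, h2]
  obtain ⟨s, ss, hss⟩ := List.exists_cons_of_ne_nil (splitR_fst_ne_nil l)
  have hr := rebuild_splitR l 0
  rw [hss] at hr ⊢
  simp only [List.headI, List.tail_cons, List.nil_append] at hr ⊢
  rw [hr, foldlA_eq_cleanRec]
  simp

theorem digit_cond (c : Char) : (48 ≤ c.toNat ∧ c.toNat ≤ 57) ↔ ('0' ≤ c ∧ c ≤ '9') := by
  have h : ∀ a b : Char, (a ≤ b) ↔ a.toNat ≤ b.toNat := fun a b => by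
    rw [Char.le_def, UInt32.le_iff_toNat_le, Char.toNat_val, Char.toNat_val]
  rw [h, h]
  have e0 : ('0' : Char).toNat = 48 := by decide
  have e9 : ('9' : Char).toNat = 57 := by decide
  rw [e0, e9]

-- ===== VERDICT (by name: the statement is the Claim_ definition above) =====
theorem IdentifyParamTypeAndCleanup_spec : Claim_equal_IdentifyParamTypeAndCleanup := by
  intro Param _
  unfold Spec_IdentifyParamTypeAndCleanup IdentifyParamTypeAndCleanup IdentifyParamTypeAndCleanup_alt
  cases Param with
  | none => rfl
  | some s =>
    by_cases hlen : s.toList.length = 0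
    · simp [hlen]
    · simp only [hlen, if_false]
      rw [← cleaned_eq s.toList]
      set cl := (s.toList.foldl pvStepA (false, [])).2 with hcl
      by_cases hc : cl.length = 0
      · have hnil : cl = [] := List.length_eq_zero_iff.mp hc
        rw [hnil]
        rfl
      · simp only [hc, if_false]
        have hd := digit_cond cl.headI
        by_cases h1 : cl.headI = '{'
        · simp [h1]
        · by_cases h2 : cl.headI = '[' ∨ cl.headI = '('
          · simp [h1, h2]
          · by_cases h3 : 48 ≤ cl.headI.toNat ∧ cl.headI.toNat ≤ 57
            · simp [h1, h2, h3, hd.mp h3]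
            · have h3' : ¬ ('0' ≤ cl.headI ∧ cl.headI ≤ '9') := fun hh => h3 (hd.mpr hh)
              simp [h1, h2, h3, h3']
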